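-- pv_equiv track=rewrite | github.com/Liu-XinAi/PRGSample01 | IncredibleCookies.py | calculate_cookie_score
-- ===== SOURCE A (Python) =====
-- def calculate_cookie_score(ingredients):
--     score = 0
--     for item in ingredients:
--         item = item.lower().strip()
--         if item == "sugar":
--             score += 5
--         elif item == "butter":
--             score += 4
--         elif item == "chocolate chips":
--             score += 3
--         elif item == "flour":
--             score -= 2
--         else:
--             score += 1
--     return score
-- ===== SOURCE B (Python) =====
-- def calculate_cookie_score(ingredients):
--     norm = [item.lower().strip() for item in ingredients]
--     cs = norm.count("sugar")
--     cb = norm.count("butter")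
--     cc = norm.count("chocolate chips")
--     cf = norm.count("flour")
--     return 5*cs + 4*cb + 3*cc - 2*cf + (len(norm) - cs - cb - cc - cf)
-- ===== Notes on version B (the rewrite author's own statement) =====
-- stated objective: alternative
-- what changed: Replaces the per-item if/elif branch chain with a count-then-combine shape: normalize all items once, count the four known ingredients, and compute the score arithmetically (the else-branch becomes len minus the known counts).
import Mathlib
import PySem

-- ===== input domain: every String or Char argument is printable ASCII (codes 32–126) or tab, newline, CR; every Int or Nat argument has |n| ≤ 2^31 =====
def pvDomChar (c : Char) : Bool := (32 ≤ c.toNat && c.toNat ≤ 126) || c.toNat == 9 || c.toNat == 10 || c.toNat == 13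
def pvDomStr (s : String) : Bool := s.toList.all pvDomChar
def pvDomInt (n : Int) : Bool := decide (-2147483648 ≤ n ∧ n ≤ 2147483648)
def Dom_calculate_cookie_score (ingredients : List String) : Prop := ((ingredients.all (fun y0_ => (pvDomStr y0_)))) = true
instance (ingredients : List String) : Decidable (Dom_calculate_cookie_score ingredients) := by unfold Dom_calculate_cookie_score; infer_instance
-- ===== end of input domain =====

-- ===== PORT A =====
-- B replaces the if/elif chain by normalizing once, counting the four known ingredients, and combining the counts arithmetically (same cost, different shape).
def calculate_cookie_score (ingredients : List String) : Int :=
  ingredients.foldl (fun score item0 =>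
    let item := PySem.Str.strip (PySem.Str.lower item0)
    if item == "sugar" then score + 5
    else if item == "butter" then score + 4
    else if item == "chocolate chips" then score + 3
    else if item == "flour" then score - 2
    else score + 1) 0

-- ===== PORT B =====
def calculate_cookie_score_alt (ingredients : List String) : Int :=
  let norm := ingredients.map (fun item => PySem.Str.strip (PySem.Str.lower item))
  let cs : Int := PySem.List.count norm "sugar"
  let cb : Int := PySem.List.count norm "butter"
  let cc : Int := PySem.List.count norm "chocolate chips"
  let cf : Int := PySem.List.count norm "flour"
  5*cs + 4*cb + 3*cc - 2*cf + ((norm.length : Int) - cs - cb - cc - cf)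

-- ===== PRECONDITION & SPEC =====
def Spec_calculate_cookie_score (ingredients : List String) (out : Int) : Prop := out = calculate_cookie_score_alt ingredients
instance (ingredients : List String) (out : Int) : Decidable (Spec_calculate_cookie_score ingredients out) := by unfold Spec_calculate_cookie_score; infer_instance

-- ===== CLAIM (what is proved, stated in full; the proofs are below) =====
def Claim_equal_calculate_cookie_score : Prop := ∀ (ingredients : List String), Dom_calculate_cookie_score ingredients → Spec_calculate_cookie_score ingredients (calculate_cookie_score ingredients)

-- ===== LEMMAS AND PROOFS =====

-- ===== VERDICT (by name: the statement is the Claim_ definition above) =====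
theorem cookie_fold_eq (l : List String) (s : Int) :
    l.foldl (fun score item0 =>
      let item := PySem.Str.strip (PySem.Str.lower item0)
      if item == "sugar" then score + 5
      else if item == "butter" then score + 4
      else if item == "chocolate chips" then score + 3
      else if item == "flour" then score - 2
      else score + 1) s
    = s + (let norm := l.map (fun item => PySem.Str.strip (PySem.Str.lower item));
        5*(PySem.List.count norm "sugar" : Int) + 4*(PySem.List.count norm "butter")
        + 3*(PySem.List.count norm "chocolate chips") - 2*(PySem.List.count norm "flour")
        + ((norm.length : Int) - PySem.List.count norm "sugar" - PySem.List.count norm "butter"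
          - PySem.List.count norm "chocolate chips" - PySem.List.count norm "flour")) := by
  induction l generalizing s with
  | nil => simp
  | cons h t ih =>
    simp only [List.foldl_cons, List.map_cons, PySem.List.count, List.count_cons, List.length_cons, ih]
    by_cases h1 : PySem.Str.strip (PySem.Str.lower h) = "sugar" <;>
    by_cases h2 : PySem.Str.strip (PySem.Str.lower h) = "butter" <;>
    by_cases h3 : PySem.Str.strip (PySem.Str.lower h) = "chocolate chips" <;>
    by_cases h4 : PySem.Str.strip (PySem.Str.lower h) = "flour" <;>
    simp_all <;> ring

theorem calculate_cookie_score_spec : Claim_equal_calculate_cookie_score := by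
  intro ingredients _
  show _ = _
  rw [calculate_cookie_score, cookie_fold_eq]
  simp [calculate_cookie_score_alt]
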